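-- pv_equiv track=rewrite | github.com/camargodev/advent-of-code-2023 | day-14/src/part_2/rolling_stones.py | shift_to_north
-- ===== SOURCE A (Python) =====
-- CUBE_STONE = "#"
--
-- SPACE = "."
--
-- def shift_to_north(stones):
--     shifted_stones = list(stones)
--     for stone_col_idx in range(len(stones[0])):
--         str_stone_col = "".join([stones[row_idx][stone_col_idx] for row_idx in range(len(stones))])
--         shifted_parts = []
--         for part in str_stone_col.split(CUBE_STONE):
--             grouped_stones = part.replace(SPACE, "")
--             empty_size = len(part) - len(grouped_stones)
--             shifted_parts.append(grouped_stones + (SPACE * empty_size))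
--         str_shifted_col = CUBE_STONE.join(shifted_parts)
--         for row_idx in range(len(stones)):
--             shifted_stones[row_idx][stone_col_idx] = str_shifted_col[row_idx]
--     return shifted_stones
-- ===== SOURCE B (Python) =====
-- CUBE_STONE = "#"
--
-- SPACE = "."
--
-- def shift_to_north(stones):
--     shifted_stones = list(stones)
--     height = len(stones)
--     for col in range(len(stones[0])):
--         col_chars = []
--         for row in range(height):
--             col_chars.extend(stones[row][col])
--         rolled = []
--         pending = []
--         dots = 0
--         for ch in col_chars:
--             if ch == CUBE_STONE:
--                 rolled.extend(pending)
--                 rolled.extend(SPACE * dots)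
--                 rolled.append(CUBE_STONE)
--                 pending = []
--                 dots = 0
--             elif ch == SPACE:
--                 dots += 1
--             else:
--                 pending.append(ch)
--         rolled.extend(pending)
--         rolled.extend(SPACE * dots)
--         for row in range(height):
--             shifted_stones[row][col] = rolled[row]
--     return shifted_stones
-- ===== Notes on version B (the rewrite author's own statement) =====
-- stated objective: alternative
-- what changed: Per column, A builds the column string and pipes it through split('#') / replace('.','') / '#'.join; B makes a single accumulator sweep over the column characters (buffered rocks + a dot counter, flushed at each '#'), with no string splitting or joining.
import Mathlib
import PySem

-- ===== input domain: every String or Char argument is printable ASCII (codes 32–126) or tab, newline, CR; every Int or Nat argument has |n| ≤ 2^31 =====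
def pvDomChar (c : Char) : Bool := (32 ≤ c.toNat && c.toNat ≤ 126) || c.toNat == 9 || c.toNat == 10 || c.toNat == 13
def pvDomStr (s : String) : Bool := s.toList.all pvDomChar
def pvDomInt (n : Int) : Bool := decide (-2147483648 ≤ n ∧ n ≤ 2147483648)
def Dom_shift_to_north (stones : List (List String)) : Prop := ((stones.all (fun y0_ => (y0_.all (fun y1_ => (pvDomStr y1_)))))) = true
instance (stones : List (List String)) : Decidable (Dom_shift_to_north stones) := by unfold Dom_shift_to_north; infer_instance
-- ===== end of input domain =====

-- B replaces A's per-column split('#')/replace('.','')/join pipeline by a single accumulator sweep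
-- (pending rocks + dot counter flushed at each '#'): objective "alternative" — one pass, no string splitting.
-- Both Pythons mutate the shared inner row lists in place identically; the theorems are about the return value.

-- ===== PORT A =====
-- A's column shift: split on '#', pack each part (rocks first, then the '.'s), re-join with '#'.
def pvShiftColA (str_stone_col : List Char) : List Char :=
  let shifted_parts :=
    (PySem.Chars.splitOn str_stone_col ['#']).foldl (fun acc part =>
      let grouped_stones := PySem.Chars.replace part ['.'] []
      let empty_size := part.length - grouped_stones.length
      acc ++ [grouped_stones ++ List.replicate empty_size '.']) []
  PySem.Chars.join ['#'] shifted_parts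

-- A's `"".join([stones[row][col] for row in range(len(stones))])`; A reads through the shared
-- (already partially updated) rows, so the read is from the current grid.
def pvReadColA (grid : List (List String)) (height col : Nat) : List Char :=
  PySem.Chars.join [] ((List.range height).map (fun row_idx => ((grid.getD row_idx []).getD col "").toList))

-- the write-back loop `shifted_stones[row][col] = s[row]`, identical in A and B
-- (indices are in range under Pre_; the .getD ' ' default is never used there)
def pvWriteCol (grid : List (List String)) (height col : Nat) (s : List Char) : List (List String) :=
  (List.range height).foldl (fun g row_idx =>
    g.set row_idx ((g.getD row_idx []).set col
      (String.ofList [(PySem.Chars.pyGet? s (row_idx : Int)).getD ' ']))) grid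

def shift_to_north (stones : List (List String)) : List (List String) :=
  (List.range (stones.headD []).length).foldl (fun shifted_stones stone_col_idx =>
    pvWriteCol shifted_stones stones.length stone_col_idx
      (pvShiftColA (pvReadColA shifted_stones stones.length stone_col_idx))) stones

-- ===== PORT B =====
-- B's loop body: flush pending rocks and counted dots at each '#', count '.', buffer rocks.
def pvRollStep (st : List Char × List Char × Nat) (ch : Char) : List Char × List Char × Nat :=
  if ch = '#' then (st.1 ++ st.2.1 ++ List.replicate st.2.2 '.' ++ ['#'], [], 0)
  else if ch = '.' then (st.1, st.2.1, st.2.2 + 1)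
  else (st.1, st.2.1 ++ [ch], st.2.2)

def pvRollColB (col_chars : List Char) : List Char :=
  let st := col_chars.foldl pvRollStep ([], [], 0)
  st.1 ++ st.2.1 ++ List.replicate st.2.2 '.'

-- B's column read: `col_chars.extend(stones[row][col])` row by row
def pvReadColB (grid : List (List String)) (height col : Nat) : List Char :=
  (List.range height).foldl (fun acc row => acc ++ ((grid.getD row []).getD col "").toList) []

def shift_to_north_alt (stones : List (List String)) : List (List String) :=
  let height := stones.length
  (List.range (stones.headD []).length).foldl (fun shifted col =>
    pvWriteCol shifted height col (pvRollColB (pvReadColB shifted height col))) stones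

-- ===== PRECONDITION & SPEC =====
-- Pre_ = exactly the inputs where Python A returns (elsewhere it raises IndexError):
-- the grid is nonempty, no row is shorter than row 0, and each of row 0's columns
-- holds at least `len(stones)` characters in total.
def Pre_shift_to_north (stones : List (List String)) : Prop :=
  stones ≠ [] ∧
  (∀ row ∈ stones, (stones.headD []).length ≤ row.length) ∧
  (∀ col ∈ List.range (stones.headD []).length,
    stones.length ≤ ((stones.map (fun row => ((row.getD col "").toList.length))).sum))
instance (stones : List (List String)) : Decidable (Pre_shift_to_north stones) := by
  unfold Pre_shift_to_north; infer_instance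

def pvWitness_shift_to_north : List (List String) :=
  [["O", ".", "#"], [".", "O", "."]]

def Spec_shift_to_north (stones : List (List String)) (out : List (List String)) : Prop := out = shift_to_north_alt stones
instance (stones : List (List String)) (out : List (List String)) : Decidable (Spec_shift_to_north stones out) := by unfold Spec_shift_to_north; infer_instance

-- ===== CLAIM (what is proved, stated in full; the proofs are below) =====
def Claim_equal_shift_to_north : Prop := ∀ (stones : List (List String)), Dom_shift_to_north stones → Pre_shift_to_north stones → Spec_shift_to_north stones (shift_to_north stones)

-- ===== LEMMAS AND PROOFS =====

-- structural version of s.split('#')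
def pvSplit : List Char → List (List Char)
  | [] => [[]]
  | c :: t => if c = '#' then [] :: pvSplit t else (pvSplit t).modifyHead (c :: ·)

def pvShiftSeg (seg : List Char) : List Char :=
  seg.filter (fun c => c ≠ '.') ++ List.replicate (seg.count '.') '.'

def pvJR : List (List Char) → List Char
  | [] => []
  | seg :: rest => '#' :: (pvShiftSeg seg ++ pvJR rest)

def pvJ (pending : List Char) (dots : Nat) : List (List Char) → List Char
  | [] => pending ++ List.replicate dots '.'
  | seg :: rest =>
      pending ++ seg.filter (fun c => c ≠ '.') ++
        List.replicate (dots + seg.count '.') '.' ++ pvJR rest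

theorem pvSplit_ne_nil (s : List Char) : pvSplit s ≠ [] := by
  induction s with
  | nil => simp [pvSplit]
  | cons c t ih =>
    simp only [pvSplit]
    split
    · simp
    · cases h : pvSplit t with
      | nil => exact absurd h ih
      | cons a l => simp

theorem pvSplitOn_go_eq (s : List Char) : ∀ fuel cur acc, s.length ≤ fuel →
    PySem.Chars.splitOn.go ['#'] fuel s cur acc =
      acc.reverse ++ (pvSplit s).modifyHead (cur.reverse ++ ·) := by
  induction s with
  | nil =>
    intro fuel cur acc _
    cases fuel <;> simp [PySem.Chars.splitOn.go, pvSplit]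
  | cons c t ih =>
    intro fuel cur acc hf
    simp only [List.length_cons] at hf
    cases fuel with
    | zero => omega
    | succ f =>
      rw [PySem.Chars.splitOn.go]
      by_cases hc : c = '#'
      · subst hc
        simp only [List.isPrefixOf, BEq.rfl, Bool.and_true, if_pos, List.length_cons,
          List.length_nil, List.drop_succ_cons, List.drop_zero]
        rw [ih f [] (cur.reverse :: acc) (by omega)]
        simp [pvSplit, List.reverse_cons, List.append_assoc]
        cases pvSplit t <;> rfl
      · have hpre : ['#'].isPrefixOf (c :: t) = false := by
          simp [List.isPrefixOf]
          exact fun h => absurd h.symm hc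
        rw [hpre]
        simp only [Bool.false_eq_true, if_false]
        rw [ih f (c :: cur) acc (by omega)]
        simp only [pvSplit, if_neg hc, List.reverse_cons]
        cases h : pvSplit t with
        | nil => exact absurd h (pvSplit_ne_nil t)
        | cons a l => simp [List.modifyHead, List.append_assoc]

theorem pvSplitOn_eq (s : List Char) : PySem.Chars.splitOn s ['#'] = pvSplit s := by
  rw [PySem.Chars.splitOn, pvSplitOn_go_eq s (s.length + 1) [] [] (Nat.le_succ _)]
  cases h : pvSplit s with
  | nil => exact absurd h (pvSplit_ne_nil s)
  | cons a l => simp [List.modifyHead]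

theorem pvReplace_go_eq (s : List Char) : ∀ fuel acc, s.length ≤ fuel →
    PySem.Chars.replace.go ['.'] [] fuel s acc =
      acc.reverse ++ s.filter (fun c => c ≠ '.') := by
  induction s with
  | nil =>
    intro fuel acc _
    cases fuel <;> simp [PySem.Chars.replace.go]
  | cons c t ih =>
    intro fuel acc hf
    simp only [List.length_cons] at hf
    cases fuel with
    | zero => omega
    | succ f =>
      rw [PySem.Chars.replace.go]
      by_cases hc : c = '.'
      · subst hc
        simp only [List.isPrefixOf, BEq.rfl, Bool.and_true, if_pos, List.length_cons,
          List.length_nil, List.drop_succ_cons, List.drop_zero, List.reverse_nil, List.nil_append]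
        rw [ih f acc (by omega)]
        simp
      · have hpre : ['.'].isPrefixOf (c :: t) = false := by
          simp [List.isPrefixOf]
          exact fun h => absurd h.symm hc
        rw [hpre]
        simp only [Bool.false_eq_true, if_false]
        rw [ih f (c :: acc) (by omega)]
        simp [hc]

theorem pvReplace_eq (s : List Char) :
    PySem.Chars.replace s ['.'] [] = s.filter (fun c => c ≠ '.') := by
  rw [PySem.Chars.replace]
  simp only [List.isEmpty_cons, Bool.false_eq_true, if_false]
  rw [pvReplace_go_eq s s.length [] (le_refl _)]
  simp

theorem pvLen_sub (s : List Char) :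
    s.length - (s.filter (fun c => c ≠ '.')).length = s.count '.' := by
  induction s with
  | nil => simp
  | cons c t ih =>
    have hle : (t.filter (fun c : Char => decide (c ≠ '.'))).length ≤ t.length :=
      List.length_filter_le _ _
    by_cases hc : c = '.' <;> simp [hc] <;>
      simp [ne_eq] at ih hle ⊢ <;> omega

theorem pvJoin_map (segs : List (List Char)) :
    PySem.Chars.join ['#'] (segs.map pvShiftSeg) = pvJ [] 0 segs := by
  induction segs with
  | nil => simp [pvJ, PySem.Chars.join, List.intercalate]
  | cons seg rest ih =>
    cases rest with
    | nil => simp [pvJ, pvJR, pvShiftSeg, PySem.Chars.join_singleton]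
    | cons b rs =>
      simp only [List.map_cons]
      rw [PySem.Chars.join_cons_cons]
      rw [List.map_cons] at ih
      rw [ih]
      simp [pvJ, pvJR, pvShiftSeg, List.append_assoc]

theorem pvColA_eq (s : List Char) : pvShiftColA s = pvJ [] 0 (pvSplit s) := by
  unfold pvShiftColA
  rw [PySem.List.foldl_append_singleton_eq_map, pvSplitOn_eq]
  have hmap : (pvSplit s).map
      (fun part => PySem.Chars.replace part ['.'] [] ++
        List.replicate (part.length - (PySem.Chars.replace part ['.'] []).length) '.') =
      (pvSplit s).map pvShiftSeg := by
    apply List.map_congr_left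
    intro part _
    rw [pvReplace_eq, pvLen_sub]
    rfl
  rw [List.nil_append, hmap, pvJoin_map]

theorem pvRoll_fold (s : List Char) : ∀ res pending dots,
    (let st := s.foldl pvRollStep (res, pending, dots)
     st.1 ++ st.2.1 ++ List.replicate st.2.2 '.') =
      res ++ pvJ pending dots (pvSplit s) := by
  induction s with
  | nil => intro res pending dots; simp [pvJ, pvJR, pvSplit, List.append_assoc]
  | cons c t ih =>
    intro res pending dots
    simp only [List.foldl_cons]
    by_cases hc : c = '#'
    · subst hc
      simp only [pvRollStep, reduceIte]
      rw [ih]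
      simp only [pvSplit, pvJ]
      cases h : pvSplit t with
      | nil => exact absurd h (pvSplit_ne_nil t)
      | cons seg rest =>
        simp [pvJR, pvShiftSeg, List.append_assoc]
    · by_cases hd : c = '.'
      · subst hd
        simp only [pvRollStep, reduceIte]
        rw [ih]
        simp only [pvSplit, if_neg hc]
        cases h : pvSplit t with
        | nil => exact absurd h (pvSplit_ne_nil t)
        | cons seg rest =>
          simp only [List.modifyHead_cons, pvJ, List.filter_cons, List.count_cons]
          simp
          omega
      · simp only [pvRollStep, if_neg hc, if_neg hd]
        rw [ih]
        simp only [pvSplit, if_neg hc]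
        cases h : pvSplit t with
        | nil => exact absurd h (pvSplit_ne_nil t)
        | cons seg rest =>
          simp only [List.modifyHead_cons, pvJ, List.filter_cons, List.count_cons]
          simp [hd, List.append_assoc]

theorem pvRoll_eq (s : List Char) : pvRollColB s = pvShiftColA s := by
  unfold pvRollColB
  rw [pvRoll_fold s [] [] 0, pvColA_eq, List.nil_append]

theorem pvJoin_nil_flatten (ps : List (List Char)) :
    PySem.Chars.join [] ps = ps.flatten := by
  induction ps with
  | nil => simp [PySem.Chars.join, List.intercalate]
  | cons a rest ih =>
    cases rest with
    | nil => simp [PySem.Chars.join_singleton]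
    | cons b rs =>
      rw [PySem.Chars.join_cons_cons, ih]
      simp

theorem pvRead_eq (g : List (List String)) (h c : Nat) :
    pvReadColB g h c = pvReadColA g h c := by
  unfold pvReadColA pvReadColB
  rw [PySem.List.foldl_append_eq_flatMap, pvJoin_nil_flatten, List.flatMap_def, List.nil_append]

-- ===== VERDICT (by name: the statement is the Claim_ definition above) =====
theorem shift_to_north_spec : Claim_equal_shift_to_north := by
  intro stones _ _
  unfold Spec_shift_to_north shift_to_north shift_to_north_alt
  exact PySem.List.foldl_congr_mem
    (List.range (stones.headD []).length)
    (f := fun shifted_stones stone_col_idx =>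
      pvWriteCol shifted_stones stones.length stone_col_idx
        (pvShiftColA (pvReadColA shifted_stones stones.length stone_col_idx)))
    (g := fun shifted col =>
      pvWriteCol shifted stones.length col (pvRollColB (pvReadColB shifted stones.length col)))
    (init := stones)
    (fun acc x _ => by simp only []; rw [pvRead_eq, pvRoll_eq])
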